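-- pv_equiv track=rewrite | github.com/tylercrompton/project-euler | p018.py | tree_permutations
-- ===== SOURCE A (Python) =====
-- def tree_permutations(iterables):
-- 	def _tree_permutations(iterables, i):
-- 		if len(iterables):
-- 			for permutation in _tree_permutations(iterables[1:], i):
-- 				yield (iterables[0][i],) + permutation
-- 			for permutation in _tree_permutations(iterables[1:], i + 1):
-- 				yield (iterables[0][i],) + permutation
-- 		yield ()
-- 	return _tree_permutations(iterables, 0)
-- ===== SOURCE B (Python) =====
-- def tree_permutations(iterables):
--     rows = list(iterables)
--     n = len(rows)
--     # cur[i] = all suffix-paths (plus per-node trailing () markers) for the part below the current row, entered at index i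
--     cur = [[()]] * (n + 1)
--     for k in reversed(range(n)):
--         row = rows[k]
--         cur = [[(row[i],) + p for p in cur[i] + cur[i + 1]] + [()]
--                for i in range(k + 1)]
--     return cur[0]
-- ===== Notes on version B (the rewrite author's own statement) =====
-- stated objective: alternative
-- what changed: Replaces the doubly-branching lazy recursion by an iterative bottom-up dynamic-programming table indexed by entry column, built row by row from the last row upward.
import Mathlib
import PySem

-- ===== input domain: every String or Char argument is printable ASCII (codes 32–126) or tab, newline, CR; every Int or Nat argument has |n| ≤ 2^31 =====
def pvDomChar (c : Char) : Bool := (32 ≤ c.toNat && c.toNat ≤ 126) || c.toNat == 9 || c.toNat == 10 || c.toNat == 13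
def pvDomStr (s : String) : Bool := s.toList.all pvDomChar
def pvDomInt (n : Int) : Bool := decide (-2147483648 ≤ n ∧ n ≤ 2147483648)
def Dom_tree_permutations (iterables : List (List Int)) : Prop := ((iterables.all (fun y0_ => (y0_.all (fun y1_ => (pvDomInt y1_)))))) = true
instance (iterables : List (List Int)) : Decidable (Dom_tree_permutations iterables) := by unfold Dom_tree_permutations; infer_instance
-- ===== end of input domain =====

-- B replaces A's lazy double recursion by an iterative bottom-up DP table (alternative decomposition, same cost);
-- A returns a generator, B an equivalent iterator — equivalence is about the sequence of produced values.

-- ===== PORT A =====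
-- _tree_permutations(iterables, i): the two recursive for-loops in order, then the trailing ().
-- row access iterables[0][i] is ported with pyGetD (default 0): Pre_ excludes the inputs where Python raises IndexError.
def pyfA : List (List Int) → Int → List (List Int)
  | [], _ => [[]]
  | r :: rest, i =>
      ((pyfA rest i).map (fun p => PySem.List.pyGetD r i 0 :: p)) ++
      ((pyfA rest (i + 1)).map (fun p => PySem.List.pyGetD r i 0 :: p)) ++ [[]]

def tree_permutations (iterables : List (List Int)) : List (List Int) :=
  pyfA iterables 0

-- ===== PORT B =====
-- one comprehension step of Source B: new row of the DP table for row `row` at depth k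
def altStep (row : List Int) (k : Nat) (cur : List (List (List Int))) : List (List (List Int)) :=
  (List.range (k + 1)).map (fun i =>
    ((cur.getD i [] ++ cur.getD (i + 1) []).map (fun p => row.getD i 0 :: p)) ++ [[]])

def tree_permutations_alt (iterables : List (List Int)) : List (List Int) :=
  let n := iterables.length
  let cur := ((List.range n).reverse).foldl
      (fun c k => altStep (iterables.getD k []) k c)
      (List.replicate (n + 1) [[]])
  cur.getD 0 []

-- ===== PRECONDITION & SPEC =====
-- Pre_ excludes exactly the inputs on which consuming A's generator raises IndexError:
-- row k must have more than k entries (the triangle shape the function is written for).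
def Pre_tree_permutations (iterables : List (List Int)) : Prop :=
  ∀ k < iterables.length, k < (iterables.getD k []).length
instance (iterables : List (List Int)) : Decidable (Pre_tree_permutations iterables) := by
  unfold Pre_tree_permutations; infer_instance

def pvWitness_tree_permutations : List (List Int) := [[1], [2, 3]]

def Spec_tree_permutations (iterables : List (List Int)) (out : List (List Int)) : Prop := out = tree_permutations_alt iterables
instance (iterables : List (List Int)) (out : List (List Int)) : Decidable (Spec_tree_permutations iterables out) := by unfold Spec_tree_permutations; infer_instance

-- ===== CLAIM (what is proved, stated in full; the proofs are below) =====
def Claim_equal_tree_permutations : Prop := ∀ (iterables : List (List Int)), Dom_tree_permutations iterables → Pre_tree_permutations iterables → Spec_tree_permutations iterables (tree_permutations iterables)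

-- ===== LEMMAS AND PROOFS =====

-- one DP step preserves the invariant "cur.getD i [] = pyfA (suffix) i"
lemma altStep_inv (rows : List (List Int)) (j : Nat) (hj : j < rows.length)
    (cur : List (List (List Int)))
    (h : ∀ i : Nat, i ≤ j + 1 → cur.getD i [] = pyfA (rows.drop (j + 1)) (i : Int)) :
    ∀ i : Nat, i ≤ j →
      (altStep (rows.getD j []) j cur).getD i [] = pyfA (rows.drop j) (i : Int) := by
  intro i hi
  have hilt : i < j + 1 := Nat.lt_succ_of_le hi
  have hget : (altStep (rows.getD j []) j cur).getD i [] =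
      ((cur.getD i [] ++ cur.getD (i + 1) []).map (fun p => (rows.getD j []).getD i 0 :: p)) ++ [[]] := by
    simp [altStep, List.getD, hilt]
  have hdrop : rows.drop j = rows[j] :: rows.drop (j + 1) := List.drop_eq_getElem_cons hj
  have hrow : rows.getD j [] = rows[j] := by simp [List.getD, List.getElem?_eq_getElem hj]
  rw [hget, hrow, hdrop, h i (le_trans hi (Nat.le_succ j)), h (i + 1) (Nat.succ_le_succ hi)]
  simp [pyfA, PySem.List.pyGetD_natCast, List.map_append]

-- folding the reversed range maintains the invariant down to depth 0
lemma fold_inv (rows : List (List Int)) :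
    ∀ (j : Nat), j ≤ rows.length →
    ∀ (cur : List (List (List Int))),
      (∀ i : Nat, i ≤ j → cur.getD i [] = pyfA (rows.drop j) (i : Int)) →
      (((List.range j).reverse).foldl (fun c k => altStep (rows.getD k []) k c) cur).getD 0 []
        = pyfA rows 0 := by
  intro j
  induction j with
  | zero =>
      intro _ cur h
      simpa using h 0 (Nat.le_refl 0)
  | succ j ih =>
      intro hj cur h
      have hjlt : j < rows.length := hj
      rw [List.range_succ, List.reverse_append]
      simp only [List.reverse_singleton, List.singleton_append, List.foldl_cons]
      exact ih (Nat.le_of_lt hjlt) _ (altStep_inv rows j hjlt cur h)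

-- ===== VERDICT (by name: the statement is the Claim_ definition above) =====
theorem tree_permutations_spec : Claim_equal_tree_permutations := by
  intro iterables _ _
  unfold Spec_tree_permutations tree_permutations tree_permutations_alt
  have h0 : ∀ i : Nat, i ≤ iterables.length →
      (List.replicate (iterables.length + 1) ([[]] : List (List Int))).getD i [] =
        pyfA (iterables.drop iterables.length) (i : Int) := by
    intro i hi
    have : i < iterables.length + 1 := Nat.lt_succ_of_le hi
    simp [List.getD, this, List.drop_length, pyfA]
  exact (fold_inv iterables iterables.length (Nat.le_refl _) _ h0).symm
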